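-- pv_equiv track=rewrite | github.com/yxu1998/miscellaneous-stuffs | hw6_skel.py | all_words
-- ===== SOURCE A (Python) =====
-- def helper(xs,x):
--     acc=[]
--     for char in xs:
--         acc.append(x+char)
--     return acc
--
-- def all_words(chars_list, k):
--     """
--     chars_list: list, a list of distinct characters
--     k: int
--     returns: list, a list with all words of k characters from chars_list
--     precondition: k >= 0
--     """
--     acc=[]
--     if k==0:
--
--         return [""]
--     else:
--         for char in chars_list:
--             acc+=helper(all_words(chars_list,k-1),char)
--
--
--
--         return acc
-- ===== SOURCE B (Python) =====
-- def all_words(chars_list, k):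
--     acc = [""]
--     for _ in range(k):
--         acc = [w + c for w in acc for c in chars_list]
--     return acc
-- ===== Notes on version B (the rewrite author's own statement) =====
-- stated objective: simpler
-- what changed: Replaces the recursion (prefix character, char-outer loop, via a helper) with an iterative bottom-up build: start from [""] and k times replace the accumulator by [w + c for w in acc for c in chars_list], no recursion and no helper.
-- outside the precondition, e.g. on all_words([], -1): A returns [], B returns ['']
import Mathlib
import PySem

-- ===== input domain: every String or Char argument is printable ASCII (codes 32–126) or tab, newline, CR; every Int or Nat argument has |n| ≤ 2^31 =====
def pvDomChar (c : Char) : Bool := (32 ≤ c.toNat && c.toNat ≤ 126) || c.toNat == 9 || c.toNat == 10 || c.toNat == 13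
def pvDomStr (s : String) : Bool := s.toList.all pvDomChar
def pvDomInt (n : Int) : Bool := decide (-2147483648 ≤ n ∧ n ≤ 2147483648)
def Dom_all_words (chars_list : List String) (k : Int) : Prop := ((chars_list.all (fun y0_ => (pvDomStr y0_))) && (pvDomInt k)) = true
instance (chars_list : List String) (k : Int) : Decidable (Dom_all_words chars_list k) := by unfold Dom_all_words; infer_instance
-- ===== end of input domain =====

-- B replaces A's recursion (prefix character, char-outer loop, via a helper) with an
-- iterative bottom-up build from [""], appending the character with the word as outer loop
-- (objective: simpler).

-- ===== PORT A =====
-- helper(xs, x): append x+char for char in xs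
def pyHelper (xs : List String) (x : String) : List String :=
  xs.foldl (fun acc ch => acc ++ [x ++ ch]) []

-- the recursion of A on k, run on k.toNat; faithful for k ≥ 0 (= Pre_), where A returns
def allWordsGo (chars_list : List String) : Nat → List String
  | 0 => [""]
  | n + 1 =>
      chars_list.foldl (fun acc ch => acc ++ pyHelper (allWordsGo chars_list n) ch) []

def all_words (chars_list : List String) (k : Int) : List String :=
  allWordsGo chars_list k.toNat

-- ===== PORT B =====
-- acc = [""]; for _ in range(k): acc = [w + c for w in acc for c in chars_list]
def all_words_alt (chars_list : List String) (k : Int) : List String :=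
  (List.range k.toNat).foldl
    (fun acc _ => acc.flatMap (fun w => chars_list.map (fun c => w ++ c))) [""]

-- ===== PRECONDITION & SPEC =====
-- Pre_ excludes k < 0 (the docstring's precondition k >= 0): there A recurses forever for
-- nonempty chars_list, and for empty chars_list returns [] only as an accident of the loop.
def Pre_all_words (chars_list : List String) (k : Int) : Prop := 0 ≤ k
instance (chars_list : List String) (k : Int) : Decidable (Pre_all_words chars_list k) := by unfold Pre_all_words; infer_instance

def pvWitness_all_words : List String × Int := (["a", "b"], 2)

def Spec_all_words (chars_list : List String) (k : Int) (out : List String) : Prop := out = all_words_alt chars_list k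
instance (chars_list : List String) (k : Int) (out : List String) : Decidable (Spec_all_words chars_list k out) := by unfold Spec_all_words; infer_instance

-- ===== CLAIM (what is proved, stated in full; the proofs are below) =====
def Claim_equal_all_words : Prop := ∀ (chars_list : List String) (k : Int), Dom_all_words chars_list k → Pre_all_words chars_list k → Spec_all_words chars_list k (all_words chars_list k)

-- ===== LEMMAS AND PROOFS =====

-- A's step: prefix each word of L by c, for c over chars_list (char outer)
def stepA (chars_list : List String) (L : List String) : List String :=
  chars_list.flatMap (fun c => L.map (fun w => c ++ w))

-- B's step: append each c of chars_list to w, for w over L (word outer)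
def stepB (chars_list : List String) (L : List String) : List String :=
  L.flatMap (fun w => chars_list.map (fun c => w ++ c))

theorem pyHelper_eq_map (xs : List String) (x : String) :
    pyHelper xs x = xs.map (fun w => x ++ w) := by
  unfold pyHelper
  rw [PySem.List.foldl_append_singleton_eq_map, List.nil_append]

theorem allWordsGo_succ (cs : List String) (n : Nat) :
    allWordsGo cs (n + 1) = stepA cs (allWordsGo cs n) := by
  show cs.foldl (fun acc ch => acc ++ pyHelper (allWordsGo cs n) ch) [] = _
  rw [PySem.List.foldl_append_eq_flatMap, List.nil_append]
  exact congrArg (fun f => List.flatMap f cs)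
    (funext fun c => pyHelper_eq_map (allWordsGo cs n) c)

theorem stepA_stepB_comm (cs : List String) (L : List String) :
    stepA cs (stepB cs L) = stepB cs (stepA cs L) := by
  simp only [stepA, stepB, List.flatMap_assoc, List.map_flatMap, List.flatMap_map,
    List.map_map, Function.comp_def, String.append_assoc]

theorem allWordsGo_step_swap (cs : List String) (n : Nat) :
    allWordsGo cs (n + 1) = stepB cs (allWordsGo cs n) := by
  induction n with
  | zero =>
      rw [allWordsGo_succ]
      show stepA cs (allWordsGo cs 0) = stepB cs (allWordsGo cs 0)
      simp [allWordsGo, stepA, stepB, List.flatMap_singleton',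
        String.append_empty, String.empty_append]
  | succ n ih =>
      have e : stepA cs (allWordsGo cs n) = stepB cs (allWordsGo cs n) :=
        (allWordsGo_succ cs n).symm.trans ih
      rw [allWordsGo_succ, ih, stepA_stepB_comm, e]

theorem allWordsGo_eq_iter (cs : List String) (n : Nat) :
    allWordsGo cs n =
      (List.range n).foldl (fun acc _ => stepB cs acc) [""] := by
  induction n with
  | zero => simp [allWordsGo]
  | succ n ih =>
      rw [List.range_succ, List.foldl_append, ← ih, allWordsGo_step_swap]
      rfl

-- ===== VERDICT (by name: the statement is the Claim_ definition above) =====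
theorem all_words_spec : Claim_equal_all_words := by
  intro cs k _ _
  unfold Spec_all_words all_words all_words_alt
  rw [allWordsGo_eq_iter]
  rfl
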